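-- pv_equiv track=rewrite | github.com/adamhooper/quebec-municipal-elections-2013 | data/gen-postal-code-to-district.py | byDistrict
-- ===== SOURCE A (Python) =====
-- def byDistrict(postalCodeToDistrict):
--     districtToPostalCode = {}
--
--     for postalCode, district in postalCodeToDistrict.items():
--         if district not in districtToPostalCode:
--             districtToPostalCode[district] = []
--
--         districtToPostalCode[district].append(postalCode)
--
--     for postalCodes in districtToPostalCode.values():
--         postalCodes.sort()
--
--     return districtToPostalCode
-- ===== SOURCE B (Python) =====
-- def byDistrict(postalCodeToDistrict):
--     # One global sort of the items by postal code replaces the per-group sorts: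
--     # pre-create every district's bucket (first-occurrence order, matching A's
--     # key order) and append each postal code in ascending order.
--     groups = {district: [] for district in postalCodeToDistrict.values()}
--     for postalCode, district in sorted(postalCodeToDistrict.items(),
--                                        key=lambda item: item[0]):
--         groups[district].append(postalCode)
--     return groups
-- ===== Notes on version B (the rewrite author's own statement) =====
-- stated objective: alternative
-- what changed: Instead of grouping in input order and then sorting every district's bucket separately, B pre-creates the buckets and fills them from a single global sort of the items by postal code, so each bucket comes out sorted with no per-group sort.
import Mathlib
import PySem

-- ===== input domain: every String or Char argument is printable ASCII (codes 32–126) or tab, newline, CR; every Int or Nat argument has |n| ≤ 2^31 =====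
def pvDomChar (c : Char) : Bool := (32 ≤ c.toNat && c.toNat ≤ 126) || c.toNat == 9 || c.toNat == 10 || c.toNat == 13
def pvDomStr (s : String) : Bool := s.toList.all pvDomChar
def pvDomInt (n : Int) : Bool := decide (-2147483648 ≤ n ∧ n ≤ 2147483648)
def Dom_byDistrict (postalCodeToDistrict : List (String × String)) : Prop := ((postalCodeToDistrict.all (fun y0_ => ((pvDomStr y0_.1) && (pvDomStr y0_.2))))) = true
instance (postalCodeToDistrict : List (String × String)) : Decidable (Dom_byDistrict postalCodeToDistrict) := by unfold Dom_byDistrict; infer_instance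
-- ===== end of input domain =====

-- B replaces A's per-district sorts by one global sort of the items; same return value, proved equal.

-- ===== PORT A =====
-- grouping loop: 'if district not in d: d[district] = []' then 'd[district].append(postalCode)';
-- the second loop sorts each value list in place (key order unchanged), so the returned dict's
-- items are the grouped items with each value replaced by its sorted self.
def byDistrict (postalCodeToDistrict : List (String × String)) : List (String × List String) :=
  let districtToPostalCode : PySem.Dict String (List String) :=
    postalCodeToDistrict.foldl (fun d pd =>
      let d := if d.contains pd.2 = true then d else d.insert pd.2 []
      d.modify pd.2 [] (fun xs => xs ++ [pd.1])) PySem.Dict.empty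
  (districtToPostalCode.items.map (fun kv => (kv.1, PySem.List.sorted kv.2 (fun x => x) false)))

-- ===== PORT B =====
-- '{district: [] for district in values}' then one pass over the items sorted by postal code,
-- appending each postal code to its district's bucket.
def byDistrict_alt (postalCodeToDistrict : List (String × String)) : List (String × List String) :=
  let groups : PySem.Dict String (List String) :=
    (postalCodeToDistrict.map (fun pd => pd.2)).foldl
      (fun g district => g.insert district []) PySem.Dict.empty
  let res :=
    (PySem.List.sorted postalCodeToDistrict (fun item => item.1) false).foldl
      (fun g pd => g.modify pd.2 [] (fun xs => xs ++ [pd.1])) groups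
  res.items

-- ===== PRECONDITION & SPEC =====
def Spec_byDistrict (postalCodeToDistrict : List (String × String)) (out : List (String × List String)) : Prop := out = byDistrict_alt postalCodeToDistrict
instance (postalCodeToDistrict : List (String × String)) (out : List (String × List String)) : Decidable (Spec_byDistrict postalCodeToDistrict out) := by unfold Spec_byDistrict; infer_instance

-- ===== CLAIM (what is proved, stated in full; the proofs are below) =====
def Claim_equal_byDistrict : Prop := ∀ (postalCodeToDistrict : List (String × String)), Dom_byDistrict postalCodeToDistrict → Spec_byDistrict postalCodeToDistrict (byDistrict postalCodeToDistrict)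

-- ===== LEMMAS AND PROOFS =====

-- A's guarded step (insert-if-absent, then append) is the plain modify-with-default step.
theorem pv_step_eq (d : PySem.Dict String (List String)) (pd : String × String) :
    (if d.contains pd.2 = true then d else d.insert pd.2 []).modify pd.2 [] (fun xs => xs ++ [pd.1])
      = d.modify pd.2 [] (fun xs => xs ++ [pd.1]) := by
  by_cases h : d.contains pd.2 = true
  · simp [h]
  · have h' : d.contains pd.2 = false := by simpa using h
    have hnone : d.get? pd.2 = none := by
      rw [PySem.Dict.contains_eq_isSome_get?] at h'
      exact Option.not_isSome_iff_eq_none.mp (by simp [h'])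
    have hkeys : pd.2 ∉ d.keys := by
      intro hk
      rw [PySem.Dict.contains_eq_decide_mem_keys] at h'
      simp [hk] at h'
    have hins : d.insert pd.2 [] = PySem.Dict.mk (d.items ++ [(pd.2, [])]) := by
      simp [PySem.Dict.insert, h']
    have hget : (PySem.Dict.mk (d.items ++ [(pd.2, [])])).get? pd.2 = some [] := by
      rw [← hins]; exact PySem.Dict.get?_insert_self d pd.2 []
    simp only [h', Bool.false_eq_true, reduceIte, PySem.Dict.modify, PySem.Dict.insert,
      PySem.Dict.contains_mk, List.any_append, List.any_cons, BEq.rfl, List.any_nil,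
      Bool.or_false, Bool.or_true, beq_iff_eq, PySem.Dict.getD, List.map_append, List.map_cons,
      List.map_nil, PySem.Dict.mk.injEq, List.append_singleton_inj, Prod.mk.injEq, true_and]
    rw [hget, hnone]
    refine ⟨?_, by simp⟩
    have hmap : ∀ p ∈ d.items,
        (if p.1 = pd.2 then (pd.2, (some ([] : List String)).getD [] ++ [pd.1]) else p) = id p := by
      intro p hp
      have : p.1 ≠ pd.2 := fun he => hkeys (he ▸ List.mem_map_of_mem hp)
      simp [this]
    rw [List.map_congr_left hmap, List.map_id]

-- getD after a 'modify key [] (· ++ [pc])' loop keyed by the SECOND component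
theorem pv_getD_modifyLoop (l : List (String × String)) (d : PySem.Dict String (List String)) (k : String) :
    (l.foldl (fun d pd => d.modify pd.2 [] (fun xs => xs ++ [pd.1])) d).getD k []
      = d.getD k [] ++ (l.filter (fun p => p.2 == k)).map (fun p => p.1) := by
  have hswap : l.foldl (fun d pd => d.modify pd.2 [] (fun xs => xs ++ [pd.1])) d
      = (l.map Prod.swap).foldl (fun d q => d.modify q.1 [] (fun xs => xs ++ [q.2])) d := by
    rw [List.foldl_map]
    simp only [Prod.fst_swap, Prod.snd_swap]
  rw [hswap, PySem.Dict.getD_foldl_modify_append]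
  congr 1
  rw [List.filter_map, List.map_map]
  congr 1

-- every key's bucket in the dict comprehension '{district: [] for district in values}' is []
theorem pv_getD_insertLoop (l : List String) (d : PySem.Dict String (List String))
    (hd : ∀ k, d.getD k [] = []) (k : String) :
    (l.foldl (fun g district => g.insert district []) d).getD k [] = [] := by
  induction l generalizing d with
  | nil => exact hd k
  | cons x xs ih =>
      refine ih _ (fun k' => ?_)
      rw [PySem.Dict.getD_insert]
      split <;> simp [hd]

theorem byDistrict_spec : Claim_equal_byDistrict := by
  intro m _
  unfold Spec_byDistrict byDistrict byDistrict_alt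
  -- replace A's guarded fold step by the plain modify step
  have hA : (fun (d : PySem.Dict String (List String)) (pd : String × String) =>
        (if d.contains pd.2 = true then d else d.insert pd.2 []).modify pd.2 [] (fun xs => xs ++ [pd.1]))
      = fun d pd => d.modify pd.2 [] (fun xs => xs ++ [pd.1]) := by
    funext d pd; exact pv_step_eq d pd
  simp only [hA]
  set K : List String := PySem.Set.ofList (m.map (fun pd => pd.2)) with hK
  -- A's dict
  set dA := m.foldl (fun (d : PySem.Dict String (List String)) pd =>
      d.modify pd.2 [] (fun xs => xs ++ [pd.1])) PySem.Dict.empty with hdA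
  have hkeysA : dA.keys = K := by
    rw [hdA, PySem.Dict.keys_foldl_modify_key (key := fun pd : String × String => pd.2)]
    simp only [PySem.Dict.keys_empty, PySem.Set.update_nil_left]
    rw [hK]
  have hnodupA : dA.keys.Nodup := by rw [hkeysA]; exact PySem.Set.nodup_ofList _
  have hgetA : ∀ k, dA.getD k [] = (m.filter (fun p => p.2 == k)).map (fun p => p.1) := by
    intro k
    rw [hdA, pv_getD_modifyLoop]
    simp
  -- B's dicts
  set groups := (m.map (fun pd => pd.2)).foldl
      (fun (g : PySem.Dict String (List String)) district => g.insert district []) PySem.Dict.empty with hgroups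
  have hkeysG : groups.keys = K := by
    rw [hgroups, PySem.Dict.keys_foldl_insert]
    simp only [PySem.Dict.keys_empty, PySem.Set.update_nil_left]
    rw [hK]
  have hnodupG : groups.keys.Nodup := by rw [hkeysG]; exact PySem.Set.nodup_ofList _
  have hgetG : ∀ k, groups.getD k [] = [] := by
    intro k
    exact pv_getD_insertLoop _ _ (fun k' => by simp) k
  set res := (PySem.List.sorted m (fun item => item.1) false).foldl
      (fun (g : PySem.Dict String (List String)) pd => g.modify pd.2 [] (fun xs => xs ++ [pd.1])) groups with hres
  have hkeysR : res.keys = K := by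
    rw [hres, PySem.Dict.keys_foldl_modify_key (key := fun pd : String × String => pd.2), hkeysG]
    rw [PySem.Set.update_eq_append_filter]
    have : ((PySem.Set.ofList ((PySem.List.sorted m (fun item => item.1) false).map (fun pd => pd.2))).filter
        (fun y => !(PySem.Set.contains K y))) = [] := by
      rw [List.filter_eq_nil_iff]
      intro y hy
      have hy' : y ∈ m.map (fun pd => pd.2) := by
        rcases List.mem_map.mp ((PySem.Set.mem_ofList _ _).mp hy) with ⟨p, hp, hpy⟩
        exact List.mem_map.mpr ⟨p, (PySem.List.mem_sorted _ _ _ _).mp hp, hpy⟩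
      have hyK : y ∈ K := by rw [hK]; exact (PySem.Set.mem_ofList _ _).mpr hy'
      simpa using hyK
    rw [this, List.append_nil]
  have hnodupR : res.keys.Nodup := by rw [hkeysR]; exact PySem.Set.nodup_ofList _
  have hgetR : ∀ k, res.getD k []
      = ((PySem.List.sorted m (fun item => item.1) false).filter (fun p => p.2 == k)).map (fun p => p.1) := by
    intro k
    rw [hres, pv_getD_modifyLoop, hgetG]
    simp
  -- each bucket: sorting the group equals filtering the globally sorted list
  have hbucket : ∀ k, PySem.List.sorted ((m.filter (fun p => p.2 == k)).map (fun p => p.1)) (fun x => x) false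
      = ((PySem.List.sorted m (fun item => item.1) false).filter (fun p => p.2 == k)).map (fun p => p.1) := by
    intro k
    apply PySem.List.sorted_id_eq_of_perm_of_pairwise
    · exact ((PySem.List.sorted_perm m (fun item => item.1) false).filter _).map _
    · have hpw : (PySem.List.sorted m (fun item => item.1) false).Pairwise
          (fun a b => a.1 ≤ b.1) := PySem.List.sorted_pairwise m (fun item => item.1)
      have hsub := List.Pairwise.sublist
        (List.filter_sublist (p := fun p => p.2 == k)
          (l := PySem.List.sorted m (fun item => item.1) false)) hpw
      exact (List.pairwise_map).mpr hsub
  -- assemble: both sides are K.map (k ↦ (k, bucket k))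
  rw [PySem.Dict.items_eq_map_keys dA hnodupA [], PySem.Dict.items_eq_map_keys res hnodupR [],
    hkeysA, hkeysR, List.map_map]
  apply List.map_congr_left
  intro k _
  simp only [Function.comp]
  rw [hgetA, hgetR, hbucket]
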